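-- pv_equiv track=rewrite | github.com/Yan-Zhelanov/algorithms | sprint_8/1_issues/e_inserting_strings.py | insert_strings
-- ===== SOURCE A (Python) =====
-- def insert_strings(text, strings):
--     strings = [
--         [string, int(index)]
--         for string, index in strings
--     ]
--     for string, current in strings:
--         text = text[:current] + string + text[current:]
--         length = len(string)
--         for index in range(len(strings)):
--             if current < strings[index][1]:
--                 strings[index][1] += length
--     return text
-- ===== SOURCE B (Python) =====
-- def insert_strings(text, strings):
--     # Piece table: keep the growing text as (source, start, end) blocks, splice each
--     # insertion in O(1) string work and join once at the end (A re-slices the whole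
--     # text on every insertion).
--     blocks = [(text, 0, len(text))]
--     total = len(text)
--     pending = [(string, int(index)) for string, index in strings]
--     while pending:
--         (string, current), pending = pending[0], pending[1:]
--         offset = current + total if current < 0 else current
--         offset = 0 if offset < 0 else (total if offset > total else offset)
--         blocks = _splice(blocks, offset, string)
--         total += len(string)
--         pending = [
--             (other, value + len(string)) if current < value else (other, value)
--             for other, value in pending
--         ]
--     return ''.join(source[start:end] for source, start, end in blocks)
--
--
-- def _splice(blocks, remaining, piece):
--     result = []
--     placed = False
--     for source, start, end in blocks:
--         if not placed and remaining <= end - start: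
--             result.append((source, start, start + remaining))
--             result.append((piece, 0, len(piece)))
--             result.append((source, start + remaining, end))
--             placed = True
--         else:
--             result.append((source, start, end))
--             if not placed:
--                 remaining -= end - start
--     if not placed:
--         result.append((piece, 0, len(piece)))
--     return result
-- ===== Notes on version B (the rewrite author's own statement) =====
-- stated objective: alternative
-- what changed: B keeps the text as a piece table of (source,start,end) blocks and splices each insertion numerically, joining once at the end, instead of A's rebuilding of the whole string by slicing+concatenation on every insertion.
import Mathlib
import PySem

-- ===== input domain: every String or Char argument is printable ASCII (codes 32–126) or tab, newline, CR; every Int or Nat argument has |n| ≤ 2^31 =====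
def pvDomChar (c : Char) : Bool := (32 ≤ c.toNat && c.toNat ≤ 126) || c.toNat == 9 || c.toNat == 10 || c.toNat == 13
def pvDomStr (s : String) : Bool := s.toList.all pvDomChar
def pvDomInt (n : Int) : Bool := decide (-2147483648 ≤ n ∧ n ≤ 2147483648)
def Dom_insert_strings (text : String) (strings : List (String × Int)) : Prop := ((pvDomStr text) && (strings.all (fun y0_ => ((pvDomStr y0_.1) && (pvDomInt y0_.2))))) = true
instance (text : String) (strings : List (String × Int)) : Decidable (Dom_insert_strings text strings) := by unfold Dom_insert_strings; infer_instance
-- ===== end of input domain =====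

-- B replaces A's per-insertion re-slicing of the whole text by a piece table
-- ((source, start, end) blocks) spliced numerically and joined once at the end.

-- ===== PORT A =====
-- inner loop 'for index in range(len(strings)): if current < strings[index][1]: strings[index][1] += length'
-- — an elementwise in-place update of the list, ported as the map over the same list.
def pvBumpA (current : Int) (length : Int) (lst : List (String × Int)) : List (String × Int) :=
  lst.map (fun entry => if current < entry.2 then (entry.1, entry.2 + length) else entry)

-- outer loop 'for string, current in strings': Python iterates the list it mutates,
-- so step k reads the CURRENT strings[k]; ported with an explicit position k and fuel r.
def pvLoopA : Nat → Nat → List (String × Int) → List Char → List Char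
  | 0, _, _, text => text
  | r + 1, k, lst, text =>
      let sc := lst.getD k ("", 0)
      let text' := PySem.List.slice text none (some sc.2) ++ sc.1.toList
                    ++ PySem.List.slice text (some sc.2) none
      pvLoopA r (k + 1) (pvBumpA sc.2 (sc.1.toList.length : Int) lst) text'

-- 'strings = [[string, int(index)] for string, index in strings]': int() on an int is
-- the identity, so the rebuilt list holds the same pairs.
def insert_strings (text : String) (strings : List (String × Int)) : String :=
  String.ofList (pvLoopA strings.length 0 strings text.toList)

-- ===== PORT B =====
-- _splice: the for-loop with the 'placed' flag, as the obvious structural recursion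
-- (once placed, the remaining blocks are copied unchanged = the rest of the list).
-- start/end/remaining are Nat: in Source B they are ints that stay ≥ 0 on every path taken.
def pvSplice : List (List Char × Nat × Nat) → Nat → List Char → List (List Char × Nat × Nat)
  | [], _, piece => [(piece, 0, piece.length)]
  | (source, start, stop) :: rest, remaining, piece =>
      if remaining ≤ stop - start then
        (source, start, start + remaining) :: (piece, 0, piece.length)
          :: (source, start + remaining, stop) :: rest
      else
        (source, start, stop) :: pvSplice rest (remaining - (stop - start)) piece

-- 'offset = current + total if current < 0 else current; offset = 0 if offset < 0 else (total if offset > total else offset)'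
def pvOffset (current : Int) (total : Nat) : Nat :=
  let off : Int := if current < 0 then current + (total : Int) else current
  (if off < 0 then 0 else if (total : Int) < off then (total : Int) else off).toNat

-- the pending-list comprehension rebuilding the not-yet-inserted entries
def pvBumpB (current : Int) (length : Int) (pending : List (String × Int)) : List (String × Int) :=
  pending.map (fun entry => if current < entry.2 then (entry.1, entry.2 + length) else entry)

-- the while-loop over pending, carrying (blocks, total)
def pvLoopB : List (String × Int) → List (List Char × Nat × Nat) → Nat → List (List Char × Nat × Nat)
  | [], blocks, _ => blocks
  | (string, current) :: pending, blocks, total =>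
      let piece := string.toList
      let blocks' := pvSplice blocks (pvOffset current total) piece
      pvLoopB (pvBumpB current (piece.length : Int) pending) blocks' (total + piece.length)
termination_by pending _ _ => pending.length
decreasing_by simp [pvBumpB]

-- ''.join(source[start:end] …): source[a:b] for 0 ≤ a, 0 ≤ b is exactly (drop a).take (b-a)
-- (PySem.List.slice_natCast).
def pvRender (blocks : List (List Char × Nat × Nat)) : List Char :=
  blocks.flatMap (fun blk => (blk.1.drop blk.2.1).take (blk.2.2 - blk.2.1))

-- 'pending = [(string, int(index)) …]': int() on an int is the identity.
def insert_strings_alt (text : String) (strings : List (String × Int)) : String :=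
  String.ofList (pvRender (pvLoopB strings [(text.toList, 0, text.toList.length)] text.toList.length))

-- ===== PRECONDITION & SPEC =====
def Spec_insert_strings (text : String) (strings : List (String × Int)) (out : String) : Prop := out = insert_strings_alt text strings
instance (text : String) (strings : List (String × Int)) (out : String) : Decidable (Spec_insert_strings text strings out) := by unfold Spec_insert_strings; infer_instance

-- ===== CLAIM (what is proved, stated in full; the proofs are below) =====
def Claim_equal_insert_strings : Prop := ∀ (text : String) (strings : List (String × Int)), Dom_insert_strings text strings → Spec_insert_strings text strings (insert_strings text strings)

-- ===== LEMMAS AND PROOFS =====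

-- every block is a valid window into its source
def pvWF (blocks : List (List Char × Nat × Nat)) : Prop :=
  ∀ blk ∈ blocks, blk.2.1 ≤ blk.2.2 ∧ blk.2.2 ≤ blk.1.length

lemma pvOffset_eq_clampIdx (c : Int) (n : Nat) :
    pvOffset c n = PySem.List.clampIdx n c := by
  simp only [pvOffset, PySem.List.clampIdx]
  split_ifs <;> omega

lemma pvSplice_wf (blocks : List (List Char × Nat × Nat)) (off : Nat) (piece : List Char)
    (hwf : pvWF blocks) (hle : off ≤ (pvRender blocks).length) :
    pvWF (pvSplice blocks off piece) := by
  induction blocks generalizing off with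
  | nil =>
      intro blk hblk
      simp [pvSplice] at hblk
      simp [hblk]
  | cons hd tl ih =>
      obtain ⟨src, a, b⟩ := hd
      have hhd : a ≤ b ∧ b ≤ src.length := hwf (src, a, b) (by simp)
      have htl : pvWF tl := fun blk h => hwf blk (List.mem_cons_of_mem _ h)
      simp only [pvRender, List.flatMap_cons, List.length_append] at hle
      have hlen : ((src.drop a).take (b - a)).length = b - a := by
        simp; omega
      simp only [pvSplice]
      split_ifs with hcase
      · intro blk hblk
        simp only [List.mem_cons] at hblk
        rcases hblk with h | h | h | h
        · simp [h]; omega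
        · simp [h]
        · simp [h]; omega
        · exact htl blk h
      · intro blk hblk
        simp only [List.mem_cons] at hblk
        rcases hblk with h | h
        · simp [h]; omega
        · exact ih _ htl (by simp only [pvRender]; omega) blk h

lemma pvSplice_render (blocks : List (List Char × Nat × Nat)) (off : Nat) (piece : List Char)
    (hwf : pvWF blocks) (hle : off ≤ (pvRender blocks).length) :
    pvRender (pvSplice blocks off piece)
      = (pvRender blocks).take off ++ piece ++ (pvRender blocks).drop off := by
  induction blocks generalizing off with
  | nil =>
      simp only [pvRender, List.flatMap_nil, List.length_nil, Nat.le_zero] at hle ⊢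
      subst hle
      simp [pvSplice]
  | cons hd tl ih =>
      obtain ⟨src, a, b⟩ := hd
      have hhd : a ≤ b ∧ b ≤ src.length := hwf (src, a, b) (by simp)
      have htl : pvWF tl := fun blk h => hwf blk (List.mem_cons_of_mem _ h)
      simp only [pvRender, List.flatMap_cons, List.length_append] at hle ⊢
      have hlen : ((src.drop a).take (b - a)).length = b - a := by
        simp; omega
      simp only [pvSplice]
      split_ifs with hcase
      · -- placed inside this block
        simp only [List.flatMap_cons]
        rw [List.take_append, List.drop_append]
        rw [hlen]
        have h1 : ((src.drop a).take (b - a)).take off = (src.drop a).take off := by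
          rw [List.take_take]; congr 1; omega
        have h2 : ((src.drop a).take (b - a)).drop off
            = (src.drop (a + off)).take (b - (a + off)) := by
          rw [List.drop_take, List.drop_drop]
          congr 1
          all_goals omega
        have h3 : off - (b - a) = 0 := by omega
        simp [h1, h2, h3]
      · -- placed further right
        simp only [List.flatMap_cons]
        have ihr := ih (off - (b - a)) htl (by simp only [pvRender]; omega)
        simp only [pvRender] at ihr
        rw [ihr, List.take_append, List.drop_append, hlen]
        have h1 : ((src.drop a).take (b - a)).take off = (src.drop a).take (b - a) := by
          apply List.take_of_length_le; omega
        have h2 : ((src.drop a).take (b - a)).drop off = [] := by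
          apply List.drop_eq_nil_of_le; omega
        simp [h1, h2]

lemma pvLoop_eq : ∀ (r k : Nat) (lst : List (String × Int)) (text : List Char)
    (blocks : List (List Char × Nat × Nat)),
    r + k = lst.length → pvWF blocks → pvRender blocks = text →
    pvRender (pvLoopB (lst.drop k) blocks text.length) = pvLoopA r k lst text := by
  intro r
  induction r with
  | zero =>
      intro k lst text blocks hrk hwf hrender
      have : lst.drop k = [] := List.drop_eq_nil_of_le (by omega)
      simp [this, pvLoopB, pvLoopA, hrender]
  | succ r ih =>
      intro k lst text blocks hrk hwf hrender
      have hk : k < lst.length := by omega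
      have hdrop : lst.drop k = lst[k] :: lst.drop (k + 1) :=
        (List.getElem_cons_drop hk).symm
      rcases hsc : lst[k] with ⟨s, c⟩
      rw [hdrop, hsc]
      have hgetD : lst.getD k ("", 0) = (s, c) := by
        rw [List.getD_eq_getElem _ _ hk, hsc]
      have hple : PySem.List.clampIdx text.length c ≤ text.length := by
        simp [PySem.List.clampIdx]; split_ifs <;> omega
      have hoff : pvOffset c text.length = PySem.List.clampIdx text.length c :=
        pvOffset_eq_clampIdx c text.length
      have hwle : pvOffset c text.length ≤ (pvRender blocks).length := by
        rw [hoff, hrender]; exact hple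
      have hsr : pvRender (pvSplice blocks (pvOffset c text.length) s.toList)
          = text.take (PySem.List.clampIdx text.length c) ++ s.toList
            ++ text.drop (PySem.List.clampIdx text.length c) := by
        rw [pvSplice_render blocks _ s.toList hwf hwle, hrender, hoff]
      have htext' : PySem.List.slice text none (some c) ++ s.toList
            ++ PySem.List.slice text (some c) none
          = text.take (PySem.List.clampIdx text.length c) ++ s.toList
            ++ text.drop (PySem.List.clampIdx text.length c) := by
        have hto : PySem.List.slice text none (some c)
            = text.take (PySem.List.clampIdx text.length c) := by
          simp [PySem.List.slice]
        rw [PySem.List.slice_some_none, hto]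
      have hlen' : (text.take (PySem.List.clampIdx text.length c) ++ s.toList
            ++ text.drop (PySem.List.clampIdx text.length c)).length
          = text.length + s.toList.length := by
        simp; omega
      have hbump : pvBumpB c (s.toList.length : Int) (lst.drop (k + 1))
          = (pvBumpA c (s.toList.length : Int) lst).drop (k + 1) := by
        simp [pvBumpA, pvBumpB, List.map_drop]
      have ihr := ih (k + 1) (pvBumpA c (s.toList.length : Int) lst)
          (text.take (PySem.List.clampIdx text.length c) ++ s.toList
            ++ text.drop (PySem.List.clampIdx text.length c))
          (pvSplice blocks (pvOffset c text.length) s.toList)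
          (by simp [pvBumpA]; omega)
          (pvSplice_wf blocks _ s.toList hwf hwle)
          hsr
      simp only [pvLoopB, pvLoopA, hgetD]
      rw [hlen'] at ihr
      rw [← htext'] at ihr
      rw [← hbump] at ihr
      exact ihr

-- ===== VERDICT (by name: the statement is the Claim_ definition above) =====
theorem insert_strings_spec : Claim_equal_insert_strings := by
  unfold Claim_equal_insert_strings
  intro text strings _
  unfold Spec_insert_strings insert_strings insert_strings_alt
  congr 1
  have h := pvLoop_eq strings.length 0 strings text.toList
      [(text.toList, 0, text.toList.length)]
      (by simp)
      (by intro blk hblk; simp at hblk; simp [hblk])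
      (by simp [pvRender])
  simpa using h.symm
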